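-- pv_equiv track=rewrite | github.com/Liu-Bot24/relay-hub | scripts/relay_agent_daemon.py | summarize_backend_error
-- ===== SOURCE A (Python) =====
-- def summarize_backend_error(text: str) -> str:
--     lines = [line.strip() for line in text.splitlines() if line.strip()]
--     if not lines:
--         return "backend execution failed"
--     markers = [
--         "invalid_api_key",
--         "Incorrect API key provided",
--         "401 Unauthorized",
--         "permission denied",
--         "No such file or directory",
--     ]
--     for marker in markers:
--         for line in reversed(lines):
--             if marker in line:
--                 return line
--     for line in reversed(lines):
--         if line.startswith("ERROR:"):
--             return line.removeprefix("ERROR:").strip()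
--     return lines[-1]
-- ===== SOURCE B (Python) =====
-- def summarize_backend_error(text: str) -> str:
--     lines = [s for s in (raw.strip() for raw in text.splitlines()) if s]
--     if not lines:
--         return "backend execution failed"
--     markers = ("invalid_api_key", "Incorrect API key provided",
--                "401 Unauthorized", "permission denied",
--                "No such file or directory")
--     # Single reverse pass: record marker -> last line containing it (set-once while
--     # walking backwards) and the last ERROR: line, then pick by marker priority.
--     found = {}
--     error_line = None
--     for cur in reversed(lines):
--         for m in markers:
--             if m not in found and m in cur:
--                 found[m] = cur
--         if error_line is None and cur.startswith("ERROR:"):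
--             error_line = cur
--     for m in markers:
--         if m in found:
--             return found[m]
--     if error_line is not None:
--         return error_line.removeprefix("ERROR:").strip()
--     return lines[-1]
-- ===== Notes on version B (the rewrite author's own statement) =====
-- stated objective: alternative
-- what changed: Replaces A's sequence of full reverse scans (one per marker, plus one more for ERROR:) with a single reverse pass that builds a set-once dict from marker to its last matching line and remembers the last ERROR: line, then picks the first present marker in priority order; empty-input guard and lines[-1] default unchanged.
import Mathlib
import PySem

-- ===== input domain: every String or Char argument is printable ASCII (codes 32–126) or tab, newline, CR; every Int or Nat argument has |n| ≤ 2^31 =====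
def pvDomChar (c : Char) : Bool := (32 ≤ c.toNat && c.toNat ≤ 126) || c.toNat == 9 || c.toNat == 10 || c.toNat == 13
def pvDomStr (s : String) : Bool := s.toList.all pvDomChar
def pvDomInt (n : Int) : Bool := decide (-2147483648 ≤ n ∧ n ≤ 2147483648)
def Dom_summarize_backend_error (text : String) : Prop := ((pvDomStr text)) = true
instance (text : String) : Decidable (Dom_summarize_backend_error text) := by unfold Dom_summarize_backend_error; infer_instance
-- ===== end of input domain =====

-- B replaces A's per-marker reverse scans with one reverse pass building a set-once
-- marker→line dict, then a priority lookup; same return value (objective: alternative).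

-- ===== PORT A =====
-- helpers shared verbatim by both Pythons: the stripped non-empty lines, the marker list,
-- and the ERROR: fallback (removeprefix ported by hand: it is only applied to lines that
-- start with "ERROR:", where Python's removeprefix drops exactly those 6 chars — exact here)
def pvLinesOf (text : String) : List String :=
  (PySem.Str.splitlines text).filterMap (fun l =>
    if PySem.Str.strip l = "" then none else some (PySem.Str.strip l))

def pvMarkers : List String :=
  ["invalid_api_key", "Incorrect API key provided", "401 Unauthorized",
   "permission denied", "No such file or directory"]

def pvStripError (l : String) : String :=
  PySem.Str.strip (String.ofList (l.toList.drop 6))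

-- A's nested loops: for marker in markers: for line in reversed(lines): if marker in line: return line
def pvLoopA : List String → List String → Option String
  | [], _ => none
  | m :: ms, revlines =>
    match revlines.find? (fun l => PySem.Str.isIn m l) with
    | some l => some l
    | none => pvLoopA ms revlines

def summarize_backend_error (text : String) : String :=
  match pvLinesOf text with
  | [] => "backend execution failed"
  | l0 :: rest =>
    match pvLoopA pvMarkers (l0 :: rest).reverse with
    | some l => l
    | none =>
      match (l0 :: rest).reverse.find? (fun l => PySem.Str.startswith l "ERROR:") with
      | some l => pvStripError l
      | none => PySem.List.pyGetD (l0 :: rest) (-1) ""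

-- ===== PORT B =====
-- B's list comprehension over the strip generator: map strip, then filter truthy
def pvLinesB (text : String) : List String :=
  ((PySem.Str.splitlines text).map PySem.Str.strip).filter (fun s => s ≠ "")

-- inner marker loop of the single reverse pass: record marker → line only if not yet recorded
def pvScanLine (d : PySem.Dict String String) (line : String) : PySem.Dict String String :=
  pvMarkers.foldl (fun d m =>
    if d.contains m then d
    else if PySem.Str.isIn m line then d.insert m line
    else d) d

-- one step of the reverse pass on the state (found, error_line)
def pvScan (st : PySem.Dict String String × Option String) (line : String) :
    PySem.Dict String String × Option String :=
  (pvScanLine st.1 line,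
   match st.2 with
   | some e => some e
   | none => if PySem.Str.startswith line "ERROR:" then some line else none)

-- priority lookup: first marker present in the dict
def pvPick : List String → PySem.Dict String String → Option String
  | [], _ => none
  | m :: ms, d =>
    match d.get? m with
    | some l => some l
    | none => pvPick ms d

def summarize_backend_error_alt (text : String) : String :=
  match pvLinesB text with
  | [] => "backend execution failed"
  | l0 :: rest =>
    match (l0 :: rest).reverse.foldl pvScan (PySem.Dict.empty, none) with
    | (found, errLine) =>
      match pvPick pvMarkers found with
      | some l => l
      | none =>
        match errLine with
        | some e => pvStripError e
        | none => PySem.List.pyGetD (l0 :: rest) (-1) ""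

-- ===== PRECONDITION & SPEC =====
def Spec_summarize_backend_error (text : String) (out : String) : Prop := out = summarize_backend_error_alt text
instance (text : String) (out : String) : Decidable (Spec_summarize_backend_error text out) := by unfold Spec_summarize_backend_error; infer_instance

-- ===== CLAIM (what is proved, stated in full; the proofs are below) =====
def Claim_equal_summarize_backend_error : Prop := ∀ (text : String), Dom_summarize_backend_error text → Spec_summarize_backend_error text (summarize_backend_error text)

-- ===== LEMMAS AND PROOFS =====

-- effect of one line's inner marker fold on a single key
theorem pv_inner_get (line x : String) :
    ∀ (ms : List String) (d : PySem.Dict String String),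
      (ms.foldl (fun d m =>
        if d.contains m then d
        else if PySem.Str.isIn m line then d.insert m line
        else d) d).get? x =
      if x ∈ ms ∧ d.get? x = none ∧ PySem.Str.isIn x line = true
      then some line else d.get? x := by
  intro ms
  induction ms with
  | nil => intro d; simp
  | cons m ms ih =>
    intro d
    simp only [List.foldl_cons]
    by_cases hx : m = x
    · subst hx
      by_cases hc : d.contains m
      · rw [if_pos hc, ih]
        have hsome : d.get? m ≠ none := by
          rw [PySem.Dict.contains_eq_isSome_get?] at hc
          exact Option.isSome_iff_ne_none.mp hc
        split_ifs with h1 h2 <;> simp_all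
      · rw [if_neg hc]
        have hnone : d.get? m = none := by
          rw [PySem.Dict.contains_eq_isSome_get?] at hc
          simpa using hc
        by_cases hin : PySem.Str.isIn m line
        · rw [if_pos hin, ih, PySem.Dict.get?_insert_self]
          simp_all
        · rw [if_neg hin, ih]
          simp_all
    · have hx' : ¬ x = m := fun h => hx h.symm
      by_cases hc : d.contains m
      · rw [if_pos hc, ih]
        simp [hx']
      · rw [if_neg hc]
        by_cases hin : PySem.Str.isIn m line
        · rw [if_pos hin, ih]
          rw [PySem.Dict.get?_insert]
          simp [hx']
        · rw [if_neg hin, ih]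
          simp [hx']

-- the dict built by the reverse pass answers, for a marker, the first matching line
theorem pv_outer_get (x : String) (hx : x ∈ pvMarkers) :
    ∀ (ls : List String) (d : PySem.Dict String String),
      (ls.foldl pvScanLine d).get? x =
      match d.get? x with
      | some v => some v
      | none => ls.find? (fun l => PySem.Str.isIn x l) := by
  intro ls
  induction ls with
  | nil => intro d; cases hd : d.get? x <;> simp [hd]
  | cons l ls ih =>
    intro d
    simp only [List.foldl_cons]
    rw [ih]
    unfold pvScanLine
    rw [pv_inner_get]
    cases hd : d.get? x with
    | some v => simp
    | none =>
      by_cases hin : PySem.Str.isIn x l = true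
      · simp_all
      · simp_all

theorem pv_pick_eq (rev : List String) :
    ∀ (ms : List String), (∀ m ∈ ms, m ∈ pvMarkers) →
      pvPick ms (rev.foldl pvScanLine PySem.Dict.empty) = pvLoopA ms rev := by
  intro ms
  induction ms with
  | nil => intro _; rfl
  | cons m ms ih =>
    intro hall
    have hm : m ∈ pvMarkers := hall m (by simp)
    unfold pvPick pvLoopA
    rw [pv_outer_get m hm rev PySem.Dict.empty, PySem.Dict.get?_empty]
    cases rev.find? (fun l => PySem.Str.isIn m l) with
    | some l => rfl
    | none => exact ih (fun a ha => hall a (by simp [ha]))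

-- B's comprehension computes the same line list as A's
theorem pv_lines_agree (text : String) : pvLinesB text = pvLinesOf text := by
  unfold pvLinesB pvLinesOf
  induction PySem.Str.splitlines text with
  | nil => rfl
  | cons l ls ih =>
    simp only [List.map_cons, List.filter_cons, List.filterMap_cons]
    by_cases h : PySem.Str.strip l = ""
    · rw [h]
      simpa using ih
    · rw [if_pos (by simpa using h), if_neg h, ih]

theorem pv_scan_fst (ls : List String) :
    ∀ (st : PySem.Dict String String × Option String),
      (ls.foldl pvScan st).1 = ls.foldl pvScanLine st.1 := by
  induction ls with
  | nil => intro st; rfl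
  | cons l ls ih => intro st; simp only [List.foldl_cons]; exact ih _

theorem pv_scan_snd (ls : List String) :
    ∀ (st : PySem.Dict String String × Option String),
      (ls.foldl pvScan st).2 =
      match st.2 with
      | some e => some e
      | none => ls.find? (fun l => PySem.Str.startswith l "ERROR:") := by
  induction ls with
  | nil => intro st; obtain ⟨d, e⟩ := st; cases e <;> rfl
  | cons l ls ih =>
    intro st
    simp only [List.foldl_cons]
    rw [ih]
    cases h2 : st.2 with
    | some e => simp [pvScan, h2]
    | none =>
      by_cases hs : PySem.Str.startswith l "ERROR:" = true <;>
        simp_all [pvScan]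

-- ===== VERDICT (by name: the statement is the Claim_ definition above) =====
theorem summarize_backend_error_spec : Claim_equal_summarize_backend_error := by
  intro text _
  unfold Spec_summarize_backend_error summarize_backend_error summarize_backend_error_alt
  rw [pv_lines_agree text]
  cases h : pvLinesOf text with
  | nil => rfl
  | cons l0 rest =>
    simp only [pv_scan_fst, pv_scan_snd,
      pv_pick_eq (l0 :: rest).reverse pvMarkers (fun m hm => hm)]
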